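-- pv_equiv track=rewrite | github.com/dudebot/flipper-mcp-bridge | src/flipper_mcp_bridge/flipper.py | _int_hex_to_file_bytes
-- ===== SOURCE A (Python) =====
-- def _int_hex_to_file_bytes(int_hex: str, total_bytes: int = 4) -> str:
--     """Convert integer hex ('DF02' or '0xDF02') to the .ir file byte field
--     ('02 DF 00 00'): little-endian bytes, zero-padded to total_bytes, space-separated."""
--     cleaned = int_hex.strip().lower().removeprefix("0x")
--     if not cleaned or any(c not in "0123456789abcdef" for c in cleaned):
--         raise ValueError(f"invalid hex value: {int_hex!r}")
--     value = int(cleaned, 16)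
--     try:
--         data = value.to_bytes(total_bytes, "little")
--     except OverflowError as e:
--         raise ValueError(f"value {int_hex!r} exceeds {total_bytes}-byte field width") from e
--     return " ".join(f"{b:02X}" for b in data)
-- ===== SOURCE B (Python) =====
-- def _int_hex_to_file_bytes(int_hex: str, total_bytes: int = 4) -> str:
--     cleaned = int_hex.strip().lower().removeprefix("0x")
--     if not cleaned or any(c not in "0123456789abcdef" for c in cleaned):
--         raise ValueError(f"invalid hex value: {int_hex!r}")
--     width = 2 * total_bytes
--     if len(cleaned.lstrip("0")) > width:
--         raise ValueError(f"value {int_hex!r} exceeds {total_bytes}-byte field width")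
--     padded = cleaned.rjust(width, "0")
--     padded = padded[len(padded) - width:]
--     pairs = [padded[i:i + 2] for i in range(0, width, 2)]
--     return " ".join(reversed(pairs)).upper()
-- ===== Notes on version B (the rewrite author's own statement) =====
-- stated objective: alternative
-- what changed: B never converts the hex value to an integer: after the same strip/lower/removeprefix validation it checks the field width by counting significant digits, left-pads the hex string to exactly 2*total_bytes characters, splits it into 2-character pairs, reverses the pair list for little-endian order and returns it space-joined and uppercased, replacing A's int(...,16)/to_bytes round-trip.
import Mathlib
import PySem

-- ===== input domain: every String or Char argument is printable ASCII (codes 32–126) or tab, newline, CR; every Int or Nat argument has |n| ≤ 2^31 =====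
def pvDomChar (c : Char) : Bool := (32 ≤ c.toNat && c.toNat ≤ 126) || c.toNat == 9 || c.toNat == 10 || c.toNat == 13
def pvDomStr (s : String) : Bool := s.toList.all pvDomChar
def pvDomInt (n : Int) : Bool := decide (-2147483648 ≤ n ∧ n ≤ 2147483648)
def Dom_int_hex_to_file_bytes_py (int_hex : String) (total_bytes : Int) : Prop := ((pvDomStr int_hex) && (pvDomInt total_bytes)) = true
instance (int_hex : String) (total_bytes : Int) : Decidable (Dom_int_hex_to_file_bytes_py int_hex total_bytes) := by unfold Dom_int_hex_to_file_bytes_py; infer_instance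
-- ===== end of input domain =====

-- B converts the hex string to bytes purely by string manipulation (pad / chunk / reverse) instead of
-- going through an integer value and to_bytes; same return value wherever A returns (objective: alternative).
-- Both programs raise on the same inputs (invalid hex, negative width, overflow); those are outside Pre_.

-- ===== PORT A =====
-- shared cleaning step: int_hex.strip().lower().removeprefix("0x")  (identical line in both Pythons)
def pvCleaned (int_hex : String) : List Char :=
  let t := PySem.Chars.lower (PySem.Chars.strip int_hex.toList)
  if t.take 2 = ['0', 'x'] then t.drop 2 else t

def pvHexDigits : List Char :=
  ['0','1','2','3','4','5','6','7','8','9','a','b','c','d','e','f']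

-- digit value used by int(cleaned, 16) (exact on the validated lowercase hex digits)
def pvHexDigitVal (c : Char) : Int :=
  (c.toNat : Int) - (if c.isDigit then 48 else 87)

-- int(cleaned, 16)
def pvHexValue (cs : List Char) : Int :=
  cs.foldl (fun acc c => acc * 16 + pvHexDigitVal c) 0

-- value.to_bytes(n, "little") as a list of byte values (raise cases handled by the caller's guard)
def pvToBytesLE (v : Int) : Nat → List Int
  | 0 => []
  | n + 1 => PySem.Int.mod v 256 :: pvToBytesLE (PySem.Int.floordiv v 256) n

-- f"{b:02X}" for 0 ≤ b < 256
def pvByteHex (b : Int) : List Char :=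
  let digs : List Char := ['0','1','2','3','4','5','6','7','8','9','A','B','C','D','E','F']
  [digs.getD (PySem.Int.floordiv b 16).toNat '0', digs.getD (PySem.Int.mod b 16).toNat '0']

def int_hex_to_file_bytes_py (int_hex : String) (total_bytes : Int) : String :=
  let cleaned := pvCleaned int_hex
  if cleaned = [] ∨ cleaned.any (fun c => ¬ c ∈ pvHexDigits) then ""   -- raise ValueError
  else
    let value := pvHexValue cleaned
    -- to_bytes raises (ValueError for negative length, OverflowError for too-large value)
    if total_bytes < 0 ∨ (256 : Int) ^ total_bytes.toNat ≤ value then ""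
    else String.ofList (PySem.Chars.join [' '] ((pvToBytesLE value total_bytes.toNat).map pvByteHex))

-- ===== PORT B =====
-- pairs of consecutive characters: [padded[i:i+2] for i in range(0, width, 2)]
def pvChunk2 : List Char → List (List Char)
  | a :: b :: rest => [a, b] :: pvChunk2 rest
  | [a] => [[a]]
  | [] => []

def int_hex_to_file_bytes_py_alt (int_hex : String) (total_bytes : Int) : String :=
  let cleaned := pvCleaned int_hex
  if cleaned = [] ∨ cleaned.any (fun c => ¬ c ∈ pvHexDigits) then ""   -- raise ValueError
  else
    let width := 2 * total_bytes
    if width < ((cleaned.dropWhile (· = '0')).length : Int) then ""   -- raise ValueError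
    else
      -- cleaned.rjust(width, "0") then keep the last `width` characters
      let padded0 := List.replicate (width.toNat - cleaned.length) '0' ++ cleaned
      let padded := padded0.drop (padded0.length - width.toNat)
      String.ofList (PySem.Chars.upper (PySem.Chars.join [' '] (pvChunk2 padded).reverse))

-- ===== PRECONDITION & SPEC =====
-- Pre_ = exactly the inputs where A returns: the cleaned string is non-empty valid hex, the byte
-- width is non-negative, and the significant digits fit the field (otherwise A raises ValueError).
def Pre_int_hex_to_file_bytes_py (int_hex : String) (total_bytes : Int) : Prop :=
  pvCleaned int_hex ≠ [] ∧ ((pvCleaned int_hex).all (· ∈ pvHexDigits)) = true ∧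
    0 ≤ total_bytes ∧
    (((pvCleaned int_hex).dropWhile (· = '0')).length : Int) ≤ 2 * total_bytes
instance (int_hex : String) (total_bytes : Int) : Decidable (Pre_int_hex_to_file_bytes_py int_hex total_bytes) := by
  unfold Pre_int_hex_to_file_bytes_py; infer_instance

def pvWitness_int_hex_to_file_bytes_py : String × Int := ("1", 1)

def Spec_int_hex_to_file_bytes_py (int_hex : String) (total_bytes : Int) (out : String) : Prop := out = int_hex_to_file_bytes_py_alt int_hex total_bytes
instance (int_hex : String) (total_bytes : Int) (out : String) : Decidable (Spec_int_hex_to_file_bytes_py int_hex total_bytes out) := by unfold Spec_int_hex_to_file_bytes_py; infer_instance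

-- ===== CLAIM (what is proved, stated in full; the proofs are below) =====
def Claim_equal_int_hex_to_file_bytes_py : Prop := ∀ (int_hex : String) (total_bytes : Int), Dom_int_hex_to_file_bytes_py int_hex total_bytes → Pre_int_hex_to_file_bytes_py int_hex total_bytes → Spec_int_hex_to_file_bytes_py int_hex total_bytes (int_hex_to_file_bytes_py int_hex total_bytes)

-- ===== LEMMAS AND PROOFS =====

lemma pvHexDigitVal_bounds {c : Char} (hc : c ∈ pvHexDigits) :
    0 ≤ pvHexDigitVal c ∧ pvHexDigitVal c < 16 := by
  fin_cases hc <;> decide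

lemma pvByteHex_pair {a b : Char} (ha : a ∈ pvHexDigits) (hb : b ∈ pvHexDigits) :
    pvByteHex (16 * pvHexDigitVal a + pvHexDigitVal b) = PySem.Chars.upper [a, b] := by
  fin_cases ha <;> fin_cases hb <;> decide

lemma pvHexValue_shift (l : List Char) :
    ∀ acc : Int, l.foldl (fun acc c => acc * 16 + pvHexDigitVal c) acc
      = acc * 16 ^ l.length + pvHexValue l := by
  induction l with
  | nil => intro acc; simp [pvHexValue]
  | cons c t ih =>
    intro acc
    have h2 : pvHexValue (c :: t) = pvHexDigitVal c * 16 ^ t.length + pvHexValue t := by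
      simp only [pvHexValue, List.foldl_cons]
      rw [ih]; simp only [pvHexValue]; ring
    simp only [List.foldl_cons, List.length_cons]
    rw [ih, h2, pow_succ]; ring

lemma pvHexValue_cons (c : Char) (t : List Char) :
    pvHexValue (c :: t) = pvHexDigitVal c * 16 ^ t.length + pvHexValue t := by
  simp only [pvHexValue, List.foldl_cons]
  rw [pvHexValue_shift]; simp only [pvHexValue]; ring

lemma pvHexValue_bounds {l : List Char} (h : ∀ c ∈ l, c ∈ pvHexDigits) :
    0 ≤ pvHexValue l ∧ pvHexValue l < 16 ^ l.length := by
  induction l with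
  | nil => simp [pvHexValue]
  | cons c t ih =>
    obtain ⟨h0, h1⟩ := ih (fun x hx => h x (List.mem_cons_of_mem _ hx))
    obtain ⟨d0, d1⟩ := pvHexDigitVal_bounds (h c List.mem_cons_self)
    rw [pvHexValue_cons]
    have hp : (0:Int) < 16 ^ t.length := by positivity
    constructor
    · nlinarith
    · simp only [List.length_cons, pow_succ]
      nlinarith

lemma pvHexValue_zeros {l : List Char} (t : List Char) (h : ∀ c ∈ l, c = '0') :
    pvHexValue (l ++ t) = pvHexValue t := by
  induction l with
  | nil => simp
  | cons c r ih =>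
    have hc : c = '0' := h c List.mem_cons_self
    subst hc
    have h0 : (0:Int) * 16 + pvHexDigitVal '0' = 0 := by decide
    simp only [List.cons_append, pvHexValue, List.foldl_cons, h0]
    exact ih (fun x hx => h x (List.mem_cons_of_mem _ hx))

lemma pvToBytesLE_split (n : Nat) :
    ∀ x h : Int, 0 ≤ x → x < 256 ^ n → 0 ≤ h → h < 256 →
      pvToBytesLE (h * 256 ^ n + x) (n + 1) = pvToBytesLE x n ++ [h] := by
  induction n with
  | zero =>
    intro x h hx0 hx1 hh0 hh1
    have hx : x = 0 := by omega
    subst hx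
    simp only [pvToBytesLE, pow_zero, mul_one, add_zero, List.nil_append]
    rw [PySem.Int.mod_eq_emod_of_pos (by norm_num)]
    rw [Int.emod_eq_of_lt hh0 hh1]
  | succ n ih =>
    intro x h hx0 hx1 hh0 hh1
    have hfd : PySem.Int.floordiv (h * 256 ^ (n + 1) + x) 256 = h * 256 ^ n + PySem.Int.floordiv x 256 := by
      rw [PySem.Int.floordiv_eq_ediv_of_pos (by norm_num : (0:Int) < 256),
          PySem.Int.floordiv_eq_ediv_of_pos (by norm_num : (0:Int) < 256)]
      rw [show h * 256 ^ (n + 1) + x = x + 256 * (h * 256 ^ n) by ring,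
          Int.add_mul_ediv_left _ _ (by norm_num : (256:Int) ≠ 0)]
      ring
    have hq0 : 0 ≤ PySem.Int.floordiv x 256 := by
      rw [PySem.Int.floordiv_eq_ediv_of_pos (by norm_num : (0:Int) < 256)]
      exact Int.ediv_nonneg hx0 (by norm_num)
    have hq1 : PySem.Int.floordiv x 256 < 256 ^ n := by
      rw [PySem.Int.floordiv_eq_ediv_of_pos (by norm_num : (0:Int) < 256)]
      rw [Int.ediv_lt_iff_lt_mul (by norm_num)]
      calc x < 256 ^ (n + 1) := hx1
        _ = 256 ^ n * 256 := by ring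
    simp only [pvToBytesLE, List.cons_append]
    congr 1
    · rw [PySem.Int.mod_eq_emod_of_pos (by norm_num : (0:Int) < 256),
          PySem.Int.mod_eq_emod_of_pos (by norm_num : (0:Int) < 256)]
      rw [show h * 256 ^ (n + 1) + x = x + 256 * (h * 256 ^ n) by ring,
          Int.add_mul_emod_self_left]
    · rw [hfd]
      exact ih _ h hq0 hq1 hh0 hh1

lemma pvMain (n : Nat) : ∀ l : List Char, l.length = 2 * n → (∀ c ∈ l, c ∈ pvHexDigits) →
    (pvToBytesLE (pvHexValue l) n).map pvByteHex
      = ((pvChunk2 l).reverse).map PySem.Chars.upper := by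
  induction n with
  | zero =>
    intro l hl _
    rw [List.length_eq_zero_iff.mp hl]
    simp [pvToBytesLE, pvChunk2]
  | succ n ih =>
    intro l hl hhex
    match l, hl with
    | a :: b :: rest, hl =>
      have hrest : rest.length = 2 * n := by simp only [List.length_cons] at hl; omega
      have ha : a ∈ pvHexDigits := hhex a (by simp)
      have hb : b ∈ pvHexDigits := hhex b (by simp)
      have hhex' : ∀ c ∈ rest, c ∈ pvHexDigits := fun c hc => hhex c (by simp [hc])
      obtain ⟨da0, da1⟩ := pvHexDigitVal_bounds ha
      obtain ⟨db0, db1⟩ := pvHexDigitVal_bounds hb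
      obtain ⟨hv0, hv1⟩ := pvHexValue_bounds hhex'
      have hpow : (16:Int) ^ rest.length = 256 ^ n := by
        rw [hrest, pow_mul]; norm_num
      have hval : pvHexValue (a :: b :: rest)
          = (16 * pvHexDigitVal a + pvHexDigitVal b) * 256 ^ n + pvHexValue rest := by
        rw [pvHexValue_cons, pvHexValue_cons]
        simp only [List.length_cons]
        rw [← hpow]
        ring
      rw [hval, pvToBytesLE_split n (pvHexValue rest) _ hv0 (by rw [hpow] at hv1; exact hv1)
            (by omega) (by omega)]
      rw [List.map_append, ih rest hrest hhex']
      have hch : pvChunk2 (a :: b :: rest) = [a, b] :: pvChunk2 rest := rfl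
      rw [hch, List.reverse_cons, List.map_append]
      simp only [List.map_cons, List.map_nil]
      rw [pvByteHex_pair ha hb]

lemma pvTake_zeros : ∀ (l : List Char) (k : Nat), k ≤ (l.takeWhile (· = '0')).length →
    ∀ c ∈ l.take k, c = '0' := by
  intro l
  induction l with
  | nil => simp
  | cons x t ih =>
    intro k hk c hc
    match k, hc with
    | k + 1, hc =>
      by_cases hx : x = '0'
      · subst hx
        simp only [List.takeWhile_cons, decide_true, if_true, List.length_cons] at hk
        simp only [List.take_succ_cons, List.mem_cons] at hc
        rcases hc with rfl | hc
        · rfl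
        · exact ih k (by omega) c hc
      · simp [hx] at hk

lemma pvJoin_upper (parts : List (List Char)) :
    PySem.Chars.upper (PySem.Chars.join [' '] parts)
      = PySem.Chars.join [' '] (parts.map PySem.Chars.upper) := by
  induction parts with
  | nil => simp [PySem.Chars.join_nil, PySem.Chars.upper]
  | cons p rest ih =>
    cases rest with
    | nil => simp [PySem.Chars.join_singleton]
    | cons q rest' =>
      simp only [List.map_cons]
      rw [PySem.Chars.join_cons_cons, PySem.Chars.join_cons_cons]
      simp only [PySem.Chars.upper, List.map_append, List.map_cons] at ih ⊢
      rw [ih]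
      have : PySem.Chars.upperChar ' ' = ' ' := by decide
      simp [this]

-- ===== VERDICT (by name: the statement is the Claim_ definition above) =====
theorem int_hex_to_file_bytes_py_spec : Claim_equal_int_hex_to_file_bytes_py := by
  intro s tb _ hpre
  obtain ⟨hne, hhexb, htb, hfit⟩ := hpre
  have hhex : ∀ c ∈ pvCleaned s, c ∈ pvHexDigits := by
    intro c hc
    have := List.all_eq_true.mp hhexb c hc
    simpa using this
  unfold Spec_int_hex_to_file_bytes_py int_hex_to_file_bytes_py int_hex_to_file_bytes_py_alt
  dsimp only
  set cl := pvCleaned s with hcl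
  set sig := cl.dropWhile (· = '0') with hsig
  have hg1 : ¬ (cl = [] ∨ cl.any (fun c => decide (¬ c ∈ pvHexDigits)) = true) := by
    rintro (h | h)
    · exact hne h
    · simp only [List.any_eq_true, decide_eq_true_eq] at h
      obtain ⟨c, hc, hnc⟩ := h
      exact hnc (hhex c hc)
  rw [if_neg hg1, if_neg hg1]
  -- value bound
  have hsplit : cl.takeWhile (· = '0') ++ sig = cl := List.takeWhile_append_dropWhile
  have hzeros : ∀ c ∈ cl.takeWhile (· = '0'), c = '0' := by
    intro c hc
    have := List.mem_takeWhile_imp hc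
    simpa using this
  have hvcl : pvHexValue cl = pvHexValue sig := by
    conv_lhs => rw [← hsplit]
    exact pvHexValue_zeros _ hzeros
  have hhex_sig : ∀ c ∈ sig, c ∈ pvHexDigits := fun c hc =>
    hhex c ((cl.dropWhile_sublist (p := fun c => decide (c = '0'))).subset hc)
  obtain ⟨hv0, hv1⟩ := pvHexValue_bounds hhex_sig
  have hsig_le : sig.length ≤ 2 * tb.toNat := by omega
  have hvlt : pvHexValue cl < 256 ^ tb.toNat := by
    rw [hvcl]
    calc pvHexValue sig < 16 ^ sig.length := hv1
      _ ≤ 16 ^ (2 * tb.toNat) := by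
          apply pow_le_pow_right₀ (by norm_num) hsig_le
      _ = 256 ^ tb.toNat := by rw [pow_mul]; norm_num
  have hg2 : ¬ (tb < 0 ∨ (256 : Int) ^ tb.toNat ≤ pvHexValue cl) := by
    rintro (h | h)
    · omega
    · exact absurd h (not_le.mpr hvlt)
  rw [if_neg hg2]
  have hg3 : ¬ ((2 : Int) * tb < (sig.length : Int)) := not_lt.mpr hfit
  rw [if_neg hg3]
  -- the padded string
  set m := (2 * tb).toNat with hmdef
  have hm : m = 2 * tb.toNat := by omega
  set L := cl.length with hL
  set padded := (List.replicate (m - L) '0' ++ cl).drop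
      ((List.replicate (m - L) '0' ++ cl).length - m) with hpadded
  have hLsig : L = (cl.takeWhile (· = '0')).length + sig.length := by
    conv_lhs => rw [hL, ← hsplit]
    simp [List.length_append]
  obtain ⟨hplen, hphex, hpval⟩ :
      padded.length = 2 * tb.toNat ∧ (∀ c ∈ padded, c ∈ pvHexDigits) ∧
        pvHexValue padded = pvHexValue cl := by
    by_cases hLm : L ≤ m
    · have hlen0 : (List.replicate (m - L) '0' ++ cl).length = m := by
        simp only [List.length_append, List.length_replicate]
        omega
      have hp : padded = List.replicate (m - L) '0' ++ cl := by
        rw [hpadded, hlen0, Nat.sub_self, List.drop_zero]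
      refine ⟨?_, ?_, ?_⟩
      · rw [hp, hlen0, hm]
      · intro c hc
        rw [hp] at hc
        rcases List.mem_append.mp hc with hc | hc
        · rw [List.eq_of_mem_replicate hc]; decide
        · exact hhex c hc
      · rw [hp]
        exact pvHexValue_zeros cl (fun c hc => List.eq_of_mem_replicate hc)
    · have h0 : m - L = 0 := by omega
      have hp : padded = cl.drop (L - m) := by
        rw [hpadded, h0]
        simp only [List.replicate_zero, List.nil_append, ← hL]
      have hz : ∀ c ∈ cl.take (L - m), c = '0' :=
        pvTake_zeros cl (L - m) (by omega)
      refine ⟨?_, ?_, ?_⟩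
      · rw [hp, List.length_drop]; omega
      · intro c hc
        rw [hp] at hc
        exact hhex c (List.drop_subset _ _ hc)
      · rw [hp]
        conv_rhs => rw [← List.take_append_drop (L - m) cl]
        exact (pvHexValue_zeros _ hz).symm
  rw [← hpval, pvMain tb.toNat padded hplen hphex, pvJoin_upper]
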